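-- pv_equiv track=rewrite | github.com/fredowo20/Metaheuristicas | Tarea 2 Drones/Drones.py | deterministic_greedy
-- ===== SOURCE A (Python) =====
-- def costForGreedy(prefTimes, available, droneIndex):
--     # Buscar en la lista de tuplas el tiempo preferente del dron
--     for tupla in prefTimes:
--         if(tupla[1] == droneIndex):
--             # Calcular el costo
--             cost = abs(tupla[0]-available)
--     return cost
--
-- def deterministic_greedy(droneSpacing, droneTimes, initial_time):
--     # Obtener el número de drones
--     numDrones = len(droneTimes)
--     # Inicializar variable para costo
--     totalCost = 0
--
--     # Crear una lista de tuplas con los tiempos preferentes de aterrizaje y los índices de los drones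
--     prefTimes = [(droneTimes[i][1], i) for i in range(numDrones)]
--
--     # Ordenar la lista de preferencias de aterrizaje por orden ascendente de tiempo preferente
--     prefTimes.sort()
--
--     # Inicializar la lista de tiempos de aterrizaje y la lista de drones asignados
--     landingTimes = []
--     assignedDrones = []
--
--     # Iterar sobre cada drone por orden de preferencia
--     for prefTime, droneIndex in prefTimes:
--         # Obtener los tiempos de aterrizaje temprano, preferente y tardío del drone
--         earlyTime, preferentialTime, lateTime = droneTimes[droneIndex]
--         availableTime = preferentialTime
--
--         if len(assignedDrones) > 0:
--             # Obtener el tiempo en el que aterrizó el último drone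
--             assignedTime = landingTimes[-1]
--             # Obtener el tiempo de separación requerido entre los drones
--             spacing = droneSpacing[assignedDrones[-1]][droneIndex]
--             # Actualizar el tiempo de aterrizaje más temprano disponible, se compara el tiempo de aterrizaje del último drone con el tiempo preferente del dron que aterrizará
--             availableTime = max(availableTime, assignedTime + spacing)
--         # Primer dron
--         else:
--             #Asignar tiempo inicial
--             availableTime = initial_time
--
--         # Si el tiempo pref del dron es mayor al tiempo actual, se espera al tiempo pref para evitar penalización
--         if prefTime >= availableTime:
--             landingTimes.append(prefTime)
--             assignedDrones.append(droneIndex)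
--         # Si el tiempo de aterrizaje del dron es menor al tiempo actual se penaliza
--         else:
--             mincost = costForGreedy(prefTimes, availableTime, droneIndex)
--             totalCost +=  mincost
--             assignedDrones.append(droneIndex)
--             landingTimes.append(availableTime)
--
--     return landingTimes, totalCost, assignedDrones
-- ===== SOURCE B (Python) =====
-- def deterministic_greedy(droneSpacing, droneTimes, initial_time):
--     # Sort drones by (preferential time, index), then split the schedule into columns.
--     order = sorted((t[1], i) for i, t in enumerate(droneTimes))
--     assignedDrones = [i for _, i in order]
--     prefs = [p for p, _ in order]
--     # Closed-form landing times: with S_k = sum of required spacings along the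
--     # sequence and q_k the k-th release time (q_0 also respects initial_time),
--     # landing_k = S_k + max_{j<=k}(q_j - S_j).  Maintain only S and that running max M.
--     landingTimes = []
--     S = 0
--     M = None
--     for k in range(len(order)):
--         if k == 0:
--             q = max(prefs[0], initial_time)
--         else:
--             S += droneSpacing[assignedDrones[k - 1]][assignedDrones[k]]
--             q = prefs[k]
--         if M is None or q - S > M:
--             M = q - S
--         landingTimes.append(S + M)
--     # Total penalty = total delay past each preferential time.
--     totalCost = sum(l - p for l, p in zip(landingTimes, prefs))
--     return landingTimes, totalCost, assignedDrones
-- ===== Notes on version B (the rewrite author's own statement) =====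
-- stated objective: alternative
-- what changed: B replaces A's last-landing-time recurrence and per-drone linear costForGreedy scan with a closed form: it keeps a running prefix sum S of the required spacings and a running max M of (release time - S), so each landing time is S + M, and computes the total cost afterwards as one sum of (landing - preferential) delays; intended as asymptotically lighter (no inner scan) but a timing run read only ~1.5x at the largest size, so no speed is claimed.
import Mathlib
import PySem

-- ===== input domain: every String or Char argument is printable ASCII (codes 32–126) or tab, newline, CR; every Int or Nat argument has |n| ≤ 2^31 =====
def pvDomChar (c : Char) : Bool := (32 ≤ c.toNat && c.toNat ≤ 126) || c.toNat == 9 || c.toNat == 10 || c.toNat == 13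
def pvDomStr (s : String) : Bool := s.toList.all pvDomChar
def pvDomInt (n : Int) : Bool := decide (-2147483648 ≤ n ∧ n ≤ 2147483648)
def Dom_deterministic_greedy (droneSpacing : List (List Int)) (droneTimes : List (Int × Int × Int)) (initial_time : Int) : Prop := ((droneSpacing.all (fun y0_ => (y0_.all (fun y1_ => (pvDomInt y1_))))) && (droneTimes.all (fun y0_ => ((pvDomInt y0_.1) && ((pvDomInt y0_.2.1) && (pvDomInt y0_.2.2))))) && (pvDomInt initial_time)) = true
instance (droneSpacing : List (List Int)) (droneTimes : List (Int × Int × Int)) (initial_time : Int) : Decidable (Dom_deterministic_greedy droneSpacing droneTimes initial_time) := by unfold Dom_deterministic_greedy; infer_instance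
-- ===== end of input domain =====

-- B drops A's last-landing-time recurrence and per-drone costForGreedy scan: it computes each
-- landing time by the closed form S_k + max_{j≤k}(q_j − S_j) over spacing prefix sums, and the
-- total cost afterwards as one sum of delays past the preferential times.

-- ===== PORT A =====
def costForGreedy (prefTimes : List (Int × Int)) (available : Int) (droneIndex : Int) : Int :=
  (prefTimes.foldl
    (fun cost tupla => if tupla.2 == droneIndex then some |tupla.1 - available| else cost)
    (none : Option Int)).getD 0

-- the body of A's for-loop (state = (landingTimes, assignedDrones, totalCost))
def stepA (droneSpacing : List (List Int)) (droneTimes : List (Int × Int × Int)) (initial_time : Int)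
    (prefTimes : List (Int × Int)) (st : List Int × List Int × Int) (pt : Int × Int) :
    List Int × List Int × Int :=
  let preferentialTime := (droneTimes.getD pt.2.toNat (0,0,0)).2.1
  let availableTime :=
    if st.2.1.length > 0 then
      max preferentialTime
        ((st.1.getLast?.getD 0) +
          ((droneSpacing.getD ((st.2.1.getLast?.getD 0).toNat) []).getD pt.2.toNat 0))
    else initial_time
  if pt.1 ≥ availableTime then
    (st.1 ++ [pt.1], st.2.1 ++ [pt.2], st.2.2)
  else
    (st.1 ++ [availableTime], st.2.1 ++ [pt.2], st.2.2 + costForGreedy prefTimes availableTime pt.2)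

def deterministic_greedy (droneSpacing : List (List Int)) (droneTimes : List (Int × Int × Int)) (initial_time : Int) : List Int × Int × List Int :=
  let numDrones : Int := (droneTimes.length : Int)
  let prefTimes0 := (PySem.List.pyRange 0 numDrones).map
    (fun i => ((droneTimes.getD i.toNat (0,0,0)).2.1, i))
  let prefTimes := PySem.List.sorted2 prefTimes0 Prod.fst Prod.snd
  let st := prefTimes.foldl (stepA droneSpacing droneTimes initial_time prefTimes) ([], [], 0)
  (st.1, st.2.2, st.2.1)

-- ===== PORT B =====
-- the body of B's loop over k (state = (landingTimes, S, M); M = None before the first step)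
def stepC (droneSpacing : List (List Int)) (initial_time : Int)
    (assigned prefs : List Int)
    (st : List Int × Int × Option Int) (k : Int) : List Int × Int × Option Int :=
  let S : Int :=
    if k == 0 then st.2.1
    else st.2.1 +
      ((droneSpacing.getD ((assigned.getD (k-1).toNat 0).toNat) []).getD ((assigned.getD k.toNat 0).toNat) 0)
  let q : Int := if k == 0 then max (prefs.getD 0 0) initial_time else prefs.getD k.toNat 0
  let M : Int :=
    match st.2.2 with
    | none => q - S
    | some m => if q - S > m then q - S else m
  (st.1 ++ [S + M], S, some M)

-- sum(l - p for l, p in zip(landingTimes, prefs))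
def zipSum : List Int → List Int → Int
  | l :: ls, p :: ps => (l - p) + zipSum ls ps
  | _, _ => 0

def deterministic_greedy_alt (droneSpacing : List (List Int)) (droneTimes : List (Int × Int × Int)) (initial_time : Int) : List Int × Int × List Int :=
  let order := PySem.List.sorted2
    ((PySem.List.enumerate droneTimes 0).map (fun p => (p.2.2.1, p.1))) Prod.fst Prod.snd
  let assigned := order.map Prod.snd
  let prefs := order.map Prod.fst
  let r := (PySem.List.pyRange 0 (order.length : Int)).foldl
    (stepC droneSpacing initial_time assigned prefs) ([], 0, none)
  (r.1, zipSum r.1 prefs, assigned)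

-- ===== PRECONDITION & SPEC =====
-- Pre_ excludes exactly the inputs on which the Python raises IndexError: some pair of drones
-- j, i landing consecutively (i is the first drone after j in the (preferentialTime, index)
-- landing order) has no spacing entry droneSpacing[j][i].
-- pvKeyLt: drone a lands before drone b (Python sorts the pairs (preferentialTime, index))
def pvKeyLt (droneTimes : List (Int × Int × Int)) (a b : Nat) : Bool :=
  decide ((droneTimes.getD a (0,0,0)).2.1 < (droneTimes.getD b (0,0,0)).2.1) ||
  (decide ((droneTimes.getD a (0,0,0)).2.1 = (droneTimes.getD b (0,0,0)).2.1) && decide (a < b))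
def pvPreB (droneSpacing : List (List Int)) (droneTimes : List (Int × Int × Int)) : Bool :=
  (List.range droneTimes.length).all fun j =>
    (List.range droneTimes.length).all fun i =>
      !(pvKeyLt droneTimes j i &&
          (List.range droneTimes.length).all fun k =>
            !(pvKeyLt droneTimes j k && pvKeyLt droneTimes k i)) ||
      (decide (j < droneSpacing.length) && decide (i < (droneSpacing.getD j []).length))
def Pre_deterministic_greedy (droneSpacing : List (List Int)) (droneTimes : List (Int × Int × Int)) (initial_time : Int) : Prop :=
  pvPreB droneSpacing droneTimes = true
instance (droneSpacing : List (List Int)) (droneTimes : List (Int × Int × Int)) (initial_time : Int) : Decidable (Pre_deterministic_greedy droneSpacing droneTimes initial_time) := by unfold Pre_deterministic_greedy; infer_instance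

def pvWitness_deterministic_greedy : List (List Int) × (List (Int × Int × Int)) × Int :=
  ([[0, 3], [2, 0]], [(0, 1, 5), (0, 2, 6)], 1)

def Spec_deterministic_greedy (droneSpacing : List (List Int)) (droneTimes : List (Int × Int × Int)) (initial_time : Int) (out : List Int × Int × List Int) : Prop := out = deterministic_greedy_alt droneSpacing droneTimes initial_time
instance (droneSpacing : List (List Int)) (droneTimes : List (Int × Int × Int)) (initial_time : Int) (out : List Int × Int × List Int) : Decidable (Spec_deterministic_greedy droneSpacing droneTimes initial_time out) := by unfold Spec_deterministic_greedy; infer_instance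

-- ===== CLAIM (what is proved, stated in full; the proofs are below) =====
def Claim_equal_deterministic_greedy : Prop := ∀ (droneSpacing : List (List Int)) (droneTimes : List (Int × Int × Int)) (initial_time : Int), Dom_deterministic_greedy droneSpacing droneTimes initial_time → Pre_deterministic_greedy droneSpacing droneTimes initial_time → Spec_deterministic_greedy droneSpacing droneTimes initial_time (deterministic_greedy droneSpacing droneTimes initial_time)

-- ===== LEMMAS AND PROOFS =====

-- the shared reference schedule: the greedy recurrence L = max(p, lastL + spacing)
def refL (droneSpacing : List (List Int)) : Int → Int → List (Int × Int) → List Int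
  | _, _, [] => []
  | lastL, lastIdx, (p, i) :: rest =>
      let L := max p (lastL + ((droneSpacing.getD lastIdx.toNat []).getD i.toNat 0))
      L :: refL droneSpacing L i rest

def refAll (droneSpacing : List (List Int)) (initial_time : Int) : List (Int × Int) → List Int
  | [] => []
  | (p, i) :: rest => max p initial_time :: refL droneSpacing (max p initial_time) i rest

-- proof-only restatement of A's loop without the cost accumulator
def stepB (droneSpacing : List (List Int)) (initial_time : Int)
    (st : List Int × List Int) (pt : Int × Int) : List Int × List Int :=
  let availableTime :=
    if st.2 ≠ [] then
      max pt.1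
        ((st.1.getLast?.getD 0) +
          ((droneSpacing.getD ((st.2.getLast?.getD 0).toNat) []).getD pt.2.toNat 0))
    else initial_time
  (st.1 ++ [max pt.1 availableTime], st.2 ++ [pt.2])

-- proof-only deferred penalty sum used to restate A's total cost
def bCostSum (droneTimes : List (Int × Int × Int)) : List Int → List Int → Int
  | t :: ts, d :: ds => (t - (droneTimes.getD d.toNat (0,0,0)).2.1) + bCostSum droneTimes ts ds
  | _, _ => 0

-- costForGreedy's fold keeps its accumulator on a list with no matching index
lemma cfg_skip (a i : Int) :
    ∀ (full : List (Int × Int)) (acc : Option Int), (∀ t ∈ full, t.2 ≠ i) →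
    full.foldl (fun cost tupla => if tupla.2 == i then some |tupla.1 - a| else cost) acc = acc := by
  intro full
  induction full with
  | nil => intro acc _; rfl
  | cons x xs ih =>
      intro acc h
      simp only [List.foldl_cons]
      rw [if_neg (by simpa using h x (List.mem_cons_self))]
      exact ih acc (fun t ht => h t (List.mem_cons_of_mem _ ht))

-- with distinct indices, costForGreedy returns |p - a| for the (unique) tuple (p, i)
lemma cfg_eq (p a i : Int) :
    ∀ (full : List (Int × Int)), (p, i) ∈ full → (full.map Prod.snd).Nodup →
    costForGreedy full a i = |p - a| := by
  have key : ∀ (full : List (Int × Int)) (acc : Option Int), (p, i) ∈ full →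
      (full.map Prod.snd).Nodup →
      full.foldl (fun cost tupla => if tupla.2 == i then some |tupla.1 - a| else cost) acc
        = some |p - a| := by
    intro full
    induction full with
    | nil => intro acc hmem _; simp at hmem
    | cons x xs ih =>
        intro acc hmem hnd
        simp only [List.map_cons, List.nodup_cons] at hnd
        simp only [List.foldl_cons]
        rcases List.mem_cons.mp hmem with hx | hx
        · rw [← hx]
          rw [if_pos (by simp)]
          exact cfg_skip a i xs _ (fun t ht hti => hnd.1 (by
            rw [← hx] at hnd ⊢
            exact List.mem_map.mpr ⟨t, ht, hti⟩))
        · exact ih _ hx hnd.2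
  intro full hmem hnd
  unfold costForGreedy
  rw [key full none hmem hnd]
  rfl

-- A's cost-free loop only appends: its output extends any starting state
lemma stepB_prefix (droneSpacing : List (List Int)) (initial_time : Int) :
    ∀ (l : List (Int × Int)) (lt ad : List Int),
      ∃ r1 r2, l.foldl (stepB droneSpacing initial_time) (lt, ad) = (lt ++ r1, ad ++ r2) := by
  intro l
  induction l with
  | nil => exact fun lt ad => ⟨[], [], by simp⟩
  | cons pt l ih =>
      intro lt ad
      obtain ⟨r1, r2, hr⟩ := ih
        (lt ++ [max pt.1 (if ad ≠ [] then
            max pt.1 ((lt.getLast?.getD 0) +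
              ((droneSpacing.getD ((ad.getLast?.getD 0).toNat) []).getD pt.2.toNat 0))
          else initial_time)]) (ad ++ [pt.2])
      refine ⟨(max pt.1 (if ad ≠ [] then
            max pt.1 ((lt.getLast?.getD 0) +
              ((droneSpacing.getD ((ad.getLast?.getD 0).toNat) []).getD pt.2.toNat 0))
          else initial_time)) :: r1, pt.2 :: r2, ?_⟩
      simp only [List.foldl_cons]
      rw [show stepB droneSpacing initial_time (lt, ad) pt
        = (lt ++ [max pt.1 (if ad ≠ [] then
            max pt.1 ((lt.getLast?.getD 0) +
              ((droneSpacing.getD ((ad.getLast?.getD 0).toNat) []).getD pt.2.toNat 0))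
          else initial_time)], ad ++ [pt.2]) from rfl, hr]
      simp

-- main loop invariant: A's fold = the cost-free fold plus the deferred penalty sum
lemma loop_inv (droneSpacing : List (List Int)) (droneTimes : List (Int × Int × Int))
    (initial_time : Int) (full : List (Int × Int)) :
    ∀ (l : List (Int × Int)) (lt ad : List Int) (tc : Int),
      (∀ pt ∈ l, ∀ a : Int, pt.1 < a → costForGreedy full a pt.2 = a - pt.1) →
      (∀ pt ∈ l, (droneTimes.getD pt.2.toNat (0,0,0)).2.1 = pt.1) →
      l.foldl (stepA droneSpacing droneTimes initial_time full) (lt, ad, tc)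
        = ((l.foldl (stepB droneSpacing initial_time) (lt, ad)).1,
           (l.foldl (stepB droneSpacing initial_time) (lt, ad)).2,
           tc + bCostSum droneTimes
             ((l.foldl (stepB droneSpacing initial_time) (lt, ad)).1.drop lt.length)
             ((l.foldl (stepB droneSpacing initial_time) (lt, ad)).2.drop ad.length)) := by
  intro l
  induction l with
  | nil =>
      intro lt ad tc _ _
      simp [bCostSum]
  | cons pt l ih =>
      intro lt ad tc H1 H2
      have hpref : (droneTimes.getD pt.2.toNat (0,0,0)).2.1 = pt.1 := H2 pt List.mem_cons_self
      have e1 : ad.length > 0 ↔ ad ≠ [] := List.length_pos_iff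
      have hA : stepA droneSpacing droneTimes initial_time full (lt, ad, tc) pt
          = (lt ++ [max pt.1 (if ad ≠ [] then
                max pt.1 ((lt.getLast?.getD 0) +
                  ((droneSpacing.getD ((ad.getLast?.getD 0).toNat) []).getD pt.2.toNat 0))
              else initial_time)],
             ad ++ [pt.2],
             tc + (max pt.1 (if ad ≠ [] then
                max pt.1 ((lt.getLast?.getD 0) +
                  ((droneSpacing.getD ((ad.getLast?.getD 0).toNat) []).getD pt.2.toNat 0))
              else initial_time) - pt.1)) := by
        simp only [stepA, hpref]
        by_cases hne : ad ≠ []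
        · rw [if_pos (e1.mpr hne), if_pos hne]
          rw [show max pt.1 (max pt.1 ((lt.getLast?.getD 0) +
              ((droneSpacing.getD ((ad.getLast?.getD 0).toNat) []).getD pt.2.toNat 0)))
            = max pt.1 ((lt.getLast?.getD 0) +
              ((droneSpacing.getD ((ad.getLast?.getD 0).toNat) []).getD pt.2.toNat 0)) from by
            rw [← max_assoc, max_self]]
          by_cases hge : pt.1 ≥ max pt.1 ((lt.getLast?.getD 0) +
              ((droneSpacing.getD ((ad.getLast?.getD 0).toNat) []).getD pt.2.toNat 0))
          · rw [if_pos hge]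
            rw [show max pt.1 ((lt.getLast?.getD 0) +
                ((droneSpacing.getD ((ad.getLast?.getD 0).toNat) []).getD pt.2.toNat 0)) = pt.1 from
              le_antisymm hge (le_max_left _ _)]
            simp
          · rw [if_neg hge]
            rw [H1 pt List.mem_cons_self _ (lt_of_not_ge hge)]
        · rw [if_neg (fun h => hne (e1.mp h)), if_neg hne]
          by_cases hge : pt.1 ≥ initial_time
          · rw [if_pos hge, max_eq_left hge]
            simp
          · rw [if_neg hge, H1 pt List.mem_cons_self _ (lt_of_not_ge hge),
              max_eq_right (le_of_lt (lt_of_not_ge hge))]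
      have hB : stepB droneSpacing initial_time (lt, ad) pt
          = (lt ++ [max pt.1 (if ad ≠ [] then
                max pt.1 ((lt.getLast?.getD 0) +
                  ((droneSpacing.getD ((ad.getLast?.getD 0).toNat) []).getD pt.2.toNat 0))
              else initial_time)], ad ++ [pt.2]) := rfl
      simp only [List.foldl_cons, hA, hB]
      rw [ih _ _ _ (fun x hx => H1 x (List.mem_cons_of_mem _ hx))
        (fun x hx => H2 x (List.mem_cons_of_mem _ hx))]
      obtain ⟨r1, r2, hr⟩ := stepB_prefix droneSpacing initial_time l
        (lt ++ [max pt.1 (if ad ≠ [] then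
            max pt.1 ((lt.getLast?.getD 0) +
              ((droneSpacing.getD ((ad.getLast?.getD 0).toNat) []).getD pt.2.toNat 0))
          else initial_time)]) (ad ++ [pt.2])
      rw [hr]
      rw [show ((lt ++ [max pt.1 (if ad ≠ [] then
            max pt.1 ((lt.getLast?.getD 0) +
              ((droneSpacing.getD ((ad.getLast?.getD 0).toNat) []).getD pt.2.toNat 0))
          else initial_time)]) ++ r1).drop lt.length
        = (max pt.1 (if ad ≠ [] then
            max pt.1 ((lt.getLast?.getD 0) +
              ((droneSpacing.getD ((ad.getLast?.getD 0).toNat) []).getD pt.2.toNat 0))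
          else initial_time)) :: r1 from by rw [List.append_assoc, List.drop_left]; rfl]
      rw [show ((ad ++ [pt.2]) ++ r2).drop ad.length = pt.2 :: r2 from by
        rw [List.append_assoc, List.drop_left]; rfl]
      rw [List.drop_left, List.drop_left]
      simp only [bCostSum, hpref, Prod.mk.injEq, true_and]
      ring

-- A's and B's unsorted preference lists are the same list
lemma base_eq (droneTimes : List (Int × Int × Int)) :
    (PySem.List.pyRange 0 (droneTimes.length : Int)).map
      (fun i => ((droneTimes.getD i.toNat (0,0,0)).2.1, i))
    = (PySem.List.enumerate droneTimes 0).map (fun p => (p.2.2.1, p.1)) := by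
  rw [PySem.List.pyRange_zero_natCast, PySem.List.enumerate_eq_zipIdx_map,
    List.map_map, List.map_map]
  apply List.ext_getElem
  · simp
  · intro k h1 h2
    simp only [List.length_map, List.length_range] at h1
    simp only [List.getElem_map, List.getElem_range, Function.comp_apply, List.getElem_zipIdx]
    rw [List.getD_eq_getElem _ _ (by simpa using h1)]
    simp

-- A's cost-free loop computes the reference schedule
lemma stepB_refL (droneSpacing : List (List Int)) (initial_time : Int) :
    ∀ (rest : List (Int × Int)) (lt ad : List Int) (lastL lastIdx : Int),
      lt.getLast?.getD 0 = lastL → ad.getLast?.getD 0 = lastIdx → ad ≠ [] →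
      rest.foldl (stepB droneSpacing initial_time) (lt, ad)
        = (lt ++ refL droneSpacing lastL lastIdx rest, ad ++ rest.map Prod.snd) := by
  intro rest
  induction rest with
  | nil => intro lt ad lastL lastIdx _ _ _; simp [refL]
  | cons pt rest ih =>
      intro lt ad lastL lastIdx hlt had hne
      obtain ⟨p, i⟩ := pt
      have hstep : stepB droneSpacing initial_time (lt, ad) (p, i)
          = (lt ++ [max p (lastL + ((droneSpacing.getD lastIdx.toNat []).getD i.toNat 0))],
             ad ++ [i]) := by
        simp only [stepB, if_pos hne, hlt, had]
        rw [show max p (max p (lastL + ((droneSpacing.getD lastIdx.toNat []).getD i.toNat 0)))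
          = max p (lastL + ((droneSpacing.getD lastIdx.toNat []).getD i.toNat 0)) from by
          rw [← max_assoc, max_self]]
      simp only [List.foldl_cons, hstep]
      rw [ih _ _ (max p (lastL + ((droneSpacing.getD lastIdx.toNat []).getD i.toNat 0))) i
        (by simp) (by simp) (by simp)]
      simp [refL]

lemma stepB_refAll (droneSpacing : List (List Int)) (initial_time : Int)
    (order : List (Int × Int)) :
    order.foldl (stepB droneSpacing initial_time) ([], [])
      = (refAll droneSpacing initial_time order, order.map Prod.snd) := by
  cases order with
  | nil => simp [refAll]
  | cons pt rest =>
      obtain ⟨p, i⟩ := pt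
      have hstep : stepB droneSpacing initial_time ([], []) (p, i)
          = ([max p initial_time], [i]) := by
        simp [stepB]
      simp only [List.foldl_cons, hstep]
      rw [stepB_refL droneSpacing initial_time rest [max p initial_time] [i]
        (max p initial_time) i (by simp) (by simp) (by simp)]
      simp [refAll]

-- getD on the projected columns of order reads the k-th pair
lemma getD_map_fst (order : List (Int × Int)) (k : Nat) (h : k < order.length) :
    (order.map Prod.fst).getD k 0 = (order[k]).1 := by
  rw [List.getD_eq_getElem _ _ (by simpa using h), List.getElem_map]
lemma getD_map_snd (order : List (Int × Int)) (k : Nat) (h : k < order.length) :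
    (order.map Prod.snd).getD k 0 = (order[k]).2 := by
  rw [List.getD_eq_getElem _ _ (by simpa using h), List.getElem_map]

-- B's loop from index k ≥ 1 onwards also computes the reference schedule: its whole state is
-- captured by the invariant S + M = last landing time
lemma stepC_refL (droneSpacing : List (List Int)) (initial_time : Int)
    (order : List (Int × Int)) :
    ∀ (m k : Nat) (acc : List Int) (S M lastIdx : Int),
      1 ≤ k → k + m = order.length →
      (order.map Prod.snd).getD (k-1) 0 = lastIdx →
      ∃ S' M',
        (List.range' k m).foldl
            (fun st (j : Nat) => stepC droneSpacing initial_time (order.map Prod.snd) (order.map Prod.fst) st (j : Int))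
            (acc, S, some M)
          = (acc ++ refL droneSpacing (S + M) lastIdx (order.drop k), S', some M') := by
  intro m
  induction m with
  | zero =>
      intro k acc S M lastIdx _ hlen _
      refine ⟨S, M, ?_⟩
      rw [show order.drop k = [] from List.drop_of_length_le (by omega)]
      simp [refL]
  | succ m ih =>
      intro k acc S M lastIdx hk hlen hlast
      have hklt : k < order.length := by omega
      have hdrop : order.drop k = order[k] :: order.drop (k+1) := List.drop_eq_getElem_cons hklt
      have horder : order[k] = ((order[k]).1, (order[k]).2) := rfl
      have hk0 : ((k : Int) == 0) = false := by
        simp only [beq_eq_false_iff_ne, ne_eq]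
        omega
      have hstep :
          stepC droneSpacing initial_time (order.map Prod.snd) (order.map Prod.fst)
            (acc, S, some M) (k : Int)
            = (acc ++ [S + ((droneSpacing.getD lastIdx.toNat []).getD ((order[k]).2).toNat 0) +
                (if (order[k]).1 - (S + ((droneSpacing.getD lastIdx.toNat []).getD ((order[k]).2).toNat 0)) > M
                 then (order[k]).1 - (S + ((droneSpacing.getD lastIdx.toNat []).getD ((order[k]).2).toNat 0))
                 else M)],
               S + ((droneSpacing.getD lastIdx.toNat []).getD ((order[k]).2).toNat 0),
               some (if (order[k]).1 - (S + ((droneSpacing.getD lastIdx.toNat []).getD ((order[k]).2).toNat 0)) > M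
                 then (order[k]).1 - (S + ((droneSpacing.getD lastIdx.toNat []).getD ((order[k]).2).toNat 0))
                 else M)) := by
        simp only [stepC, hk0, Bool.false_eq_true, if_false]
        rw [show ((k : Int) - 1).toNat = k - 1 from by omega,
          show ((k : Int)).toNat = k from by omega,
          hlast, getD_map_snd order k hklt, getD_map_fst order k hklt]
      have hL : S + ((droneSpacing.getD lastIdx.toNat []).getD ((order[k]).2).toNat 0) +
            (if (order[k]).1 - (S + ((droneSpacing.getD lastIdx.toNat []).getD ((order[k]).2).toNat 0)) > M
             then (order[k]).1 - (S + ((droneSpacing.getD lastIdx.toNat []).getD ((order[k]).2).toNat 0))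
             else M)
          = max (order[k]).1 ((S + M) + ((droneSpacing.getD lastIdx.toNat []).getD ((order[k]).2).toNat 0)) := by
        split_ifs with h <;> omega
      rw [List.range'_succ]
      simp only [List.foldl_cons]
      rw [hstep]
      obtain ⟨S', M', hres⟩ := ih (k+1)
        (acc ++ [S + ((droneSpacing.getD lastIdx.toNat []).getD ((order[k]).2).toNat 0) +
          (if (order[k]).1 - (S + ((droneSpacing.getD lastIdx.toNat []).getD ((order[k]).2).toNat 0)) > M
           then (order[k]).1 - (S + ((droneSpacing.getD lastIdx.toNat []).getD ((order[k]).2).toNat 0))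
           else M)])
        (S + ((droneSpacing.getD lastIdx.toNat []).getD ((order[k]).2).toNat 0))
        (if (order[k]).1 - (S + ((droneSpacing.getD lastIdx.toNat []).getD ((order[k]).2).toNat 0)) > M
         then (order[k]).1 - (S + ((droneSpacing.getD lastIdx.toNat []).getD ((order[k]).2).toNat 0))
         else M)
        ((order[k]).2) (by omega) (by omega)
        (by simpa using getD_map_snd order k hklt)
      refine ⟨S', M', ?_⟩
      rw [hres, hdrop, horder]
      simp only [refL]
      rw [hL]
      simp [List.append_assoc]

lemma stepC_refAll (droneSpacing : List (List Int)) (initial_time : Int)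
    (order : List (Int × Int)) :
    ((PySem.List.pyRange 0 (order.length : Int)).foldl
        (stepC droneSpacing initial_time (order.map Prod.snd) (order.map Prod.fst))
        ([], 0, none)).1
      = refAll droneSpacing initial_time order := by
  rw [PySem.List.pyRange_zero_natCast, List.foldl_map]
  cases order with
  | nil => simp [refAll]
  | cons pt rest =>
      obtain ⟨p, i⟩ := pt
      rw [List.range_eq_range', show ((p, i) :: rest).length = rest.length + 1 from rfl,
        List.range'_succ]
      simp only [Nat.zero_add, List.foldl_cons]
      have hstep :
          stepC droneSpacing initial_time (((p, i) :: rest).map Prod.snd)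
              (((p, i) :: rest).map Prod.fst) ([], 0, none) ((0 : Nat) : Int)
            = ([max p initial_time], 0, some (max p initial_time)) := by
        simp only [stepC]
        norm_num
      rw [hstep]
      obtain ⟨S', M', hres⟩ := stepC_refL droneSpacing initial_time ((p, i) :: rest)
        rest.length 1 [max p initial_time] 0 (max p initial_time) i
        (by omega) (by simp; omega) (by simp)
      rw [hres]
      simp [refAll]

-- the deferred penalty sum is the zip sum of delays past the preferential times
lemma bCostSum_zipSum (droneTimes : List (Int × Int × Int)) :
    ∀ (order : List (Int × Int)) (L : List Int),
      (∀ pt ∈ order, (droneTimes.getD pt.2.toNat (0,0,0)).2.1 = pt.1) →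
      bCostSum droneTimes L (order.map Prod.snd) = zipSum L (order.map Prod.fst) := by
  intro order
  induction order with
  | nil => intro L _; cases L <;> simp [bCostSum, zipSum]
  | cons pt rest ih =>
      intro L H
      obtain ⟨p, i⟩ := pt
      cases L with
      | nil => simp [bCostSum, zipSum]
      | cons l ls =>
          simp only [List.map_cons, bCostSum, zipSum]
          rw [H (p, i) List.mem_cons_self, ih ls (fun x hx => H x (List.mem_cons_of_mem _ hx))]

lemma main_eq (droneSpacing : List (List Int)) (droneTimes : List (Int × Int × Int))
    (initial_time : Int) :
    deterministic_greedy droneSpacing droneTimes initial_time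
      = deterministic_greedy_alt droneSpacing droneTimes initial_time := by
  simp only [deterministic_greedy, deterministic_greedy_alt]
  rw [← base_eq droneTimes]
  have hperm := PySem.List.sorted2_perm
    ((PySem.List.pyRange 0 (droneTimes.length : Int)).map
      (fun i => ((droneTimes.getD i.toNat (0,0,0)).2.1, i))) Prod.fst Prod.snd false
  have hnd : ((PySem.List.sorted2
      ((PySem.List.pyRange 0 (droneTimes.length : Int)).map
        (fun i => ((droneTimes.getD i.toNat (0,0,0)).2.1, i)))
      Prod.fst Prod.snd).map Prod.snd).Nodup := by
    refine ((hperm.map Prod.snd).nodup_iff).mpr ?_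
    rw [List.map_map]
    rw [show (Prod.snd ∘ fun i : Int => ((droneTimes.getD i.toNat (0,0,0)).2.1, i)) = id from rfl]
    rw [List.map_id, PySem.List.pyRange_zero_natCast]
    exact List.Nodup.map (fun a b h => by exact_mod_cast h) (List.nodup_range)
  have H2 : ∀ pt ∈ (PySem.List.sorted2
      ((PySem.List.pyRange 0 (droneTimes.length : Int)).map
        (fun i => ((droneTimes.getD i.toNat (0,0,0)).2.1, i)))
      Prod.fst Prod.snd), (droneTimes.getD pt.2.toNat (0,0,0)).2.1 = pt.1 := by
    intro pt hpt
    obtain ⟨i, _, hi⟩ := List.mem_map.mp (hperm.mem_iff.mp hpt)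
    subst hi
    rfl
  have H1 : ∀ pt ∈ (PySem.List.sorted2
      ((PySem.List.pyRange 0 (droneTimes.length : Int)).map
        (fun i => ((droneTimes.getD i.toNat (0,0,0)).2.1, i)))
      Prod.fst Prod.snd), ∀ a : Int, pt.1 < a →
      costForGreedy (PySem.List.sorted2
        ((PySem.List.pyRange 0 (droneTimes.length : Int)).map
          (fun i => ((droneTimes.getD i.toNat (0,0,0)).2.1, i)))
        Prod.fst Prod.snd) a pt.2 = a - pt.1 := by
    intro pt hpt a hlt
    rw [cfg_eq pt.1 a pt.2 _ hpt hnd]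
    rw [abs_of_neg (by omega)]
    ring
  rw [loop_inv droneSpacing droneTimes initial_time _ _ [] [] 0 H1 H2]
  rw [stepB_refAll droneSpacing initial_time]
  rw [stepC_refAll droneSpacing initial_time]
  simp only [List.length_nil, List.drop_zero, zero_add]
  rw [bCostSum_zipSum droneTimes _ _ H2]

-- ===== VERDICT (by name: the statement is the Claim_ definition above) =====
theorem deterministic_greedy_spec : Claim_equal_deterministic_greedy := by
  intro droneSpacing droneTimes initial_time _ _
  unfold Spec_deterministic_greedy
  exact main_eq droneSpacing droneTimes initial_time
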